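-- pv_equiv track=rewrite | github.com/MdAbedin/binarysearch | 0601 - 0700/0634 A Flight of Stairs Sequel.py | solve
-- ===== SOURCE A (Python) =====
-- def solve(n, k):
--     dp = [[1] + [0]*k]
--
--     for stair in range(1,n+1):
--         next_ans = [0]*(k+1)
--
--         for step in [1,2]:
--             if stair - step >= 0:
--                 for count in range(k+1):
--                     next_ans[count] += dp[stair - step][count]
--
--         if stair - 3 >= 0:
--             for count in range(1,k+1):
--                 next_ans[count] += dp[stair - 3][count-1]
--
--         dp.append(next_ans)
--
--     return sum(dp[-1])
-- ===== SOURCE B (Python) =====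
-- def solve(n, k):
--     # Column-major DP on the cumulative counts F(i, t) = number of step-{1,2,3}
--     # climbs of i stairs using at most t threes:
--     #   F(i, t) = F(i-1, t) + F(i-2, t) + F(i-3, t-1)
--     # Computed one column (fixed t) at a time, keeping only the previous column,
--     # and the answer is a single table entry F(n, k) (no final summation).
--     if n <= 0:
--         return 1  # the empty climb (A treats every n <= 0 as "no stairs left")
--     if k < 0:
--         return 0
--     prev = []
--     for t in range(k + 1):
--         cur = [1]
--         for i in range(1, n + 1):
--             v = cur[i - 1]
--             if i >= 2:
--                 v += cur[i - 2]
--             if t >= 1 and i >= 3: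
--                 v += prev[i - 3]
--             cur.append(v)
--         prev = cur
--     return prev[n]
-- ===== Notes on version B (the rewrite author's own statement) =====
-- stated objective: alternative
-- what changed: A fills a full (n+1)x(k+1) table of exact-three-counts row by row (stair-major, with an extra shifted pass per row) and sums the last row; B runs the DP column-major over the cumulative quantity F(i,t) = climbs with at most t threes, keeping only the previous column and reading off the single entry F(n,k) with no final summation.
import Mathlib
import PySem

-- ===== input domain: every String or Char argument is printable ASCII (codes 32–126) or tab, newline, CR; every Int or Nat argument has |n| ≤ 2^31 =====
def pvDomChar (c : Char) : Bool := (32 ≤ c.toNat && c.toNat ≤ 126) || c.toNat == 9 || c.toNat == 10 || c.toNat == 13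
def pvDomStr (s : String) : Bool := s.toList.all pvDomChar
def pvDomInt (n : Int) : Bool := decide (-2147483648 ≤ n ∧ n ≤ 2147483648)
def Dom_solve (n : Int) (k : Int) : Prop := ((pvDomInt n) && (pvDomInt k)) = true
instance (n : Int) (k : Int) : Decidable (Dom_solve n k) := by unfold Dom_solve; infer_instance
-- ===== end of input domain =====

-- B replaces A's row-major table of exact-three-counts (summed at the end) by a
-- column-major DP on cumulative counts, keeping one column and reading off one entry.

-- ===== PORT A =====
def solve (n : Int) (k : Int) : Int :=
  let dp0 : List (List Int) := [[(1:Int)] ++ List.replicate k.toNat 0]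
  let dp := (PySem.List.pyRange 1 (n+1) 1).foldl (fun dp stair =>
    let next0 : List Int := List.replicate (k+1).toNat 0
    let next1 := [(1:Int), 2].foldl (fun next step =>
      if stair - step ≥ 0 then
        (PySem.List.pyRange 0 (k+1) 1).foldl (fun next count =>
          PySem.List.pySetD next count
            (PySem.List.pyGetD next count 0 +
             PySem.List.pyGetD (PySem.List.pyGetD dp (stair - step) []) count 0)) next
      else next) next0
    let next2 := if stair - 3 ≥ 0 then
        (PySem.List.pyRange 1 (k+1) 1).foldl (fun next count =>
          PySem.List.pySetD next count
            (PySem.List.pyGetD next count 0 +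
             PySem.List.pyGetD (PySem.List.pyGetD dp (stair - 3) []) (count - 1) 0)) next1
      else next1
    dp ++ [next2]) dp0
  (PySem.List.pyGetD dp (-1) []).sum

-- ===== PORT B =====
def solve_alt (n : Int) (k : Int) : Int :=
  if n ≤ 0 then 1
  else if k < 0 then 0
  else
    let prev : List Int := []
    let prev := (PySem.List.pyRange 0 (k+1) 1).foldl (fun prev t =>
      let cur : List Int := [(1:Int)]
      let cur := (PySem.List.pyRange 1 (n+1) 1).foldl (fun cur i =>
        let v := PySem.List.pyGetD cur (i-1) 0
        let v := if i ≥ 2 then v + PySem.List.pyGetD cur (i-2) 0 else v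
        let v := if t ≥ 1 ∧ i ≥ 3 then v + PySem.List.pyGetD prev (i-3) 0 else v
        cur ++ [v]) cur
      cur) prev
    PySem.List.pyGetD prev n 0

-- ===== PRECONDITION & SPEC =====
def Spec_solve (n : Int) (k : Int) (out : Int) : Prop := out = solve_alt n k
instance (n : Int) (k : Int) (out : Int) : Decidable (Spec_solve n k out) := by unfold Spec_solve; infer_instance

-- ===== CLAIM (what is proved, stated in full; the proofs are below) =====
def Claim_equal_solve : Prop := ∀ (n : Int) (k : Int), Dom_solve n k → Spec_solve n k (solve n k)

-- ===== LEMMAS AND PROOFS =====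

-- exact count of climbs of i stairs with exactly c threes
def E (i c : Nat) : Int :=
  if _h : i = 0 then (if c = 0 then 1 else 0)
  else E (i-1) c + (if 2 ≤ i then E (i-2) c else 0) +
       (if 3 ≤ i ∧ 1 ≤ c then E (i-3) (c-1) else 0)
termination_by i
decreasing_by all_goals omega

-- row i of A's table, for threshold K
def rowE (K i : Nat) : List Int := (List.range (K+1)).map (fun c => E i c)

-- cumulative count: climbs of i stairs with at most t threes
def F (t i : Nat) : Int := ∑ c ∈ Finset.range (t+1), E i c


-- ---- proof-only helpers: named forms of the ports' loop bodies ----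

def stepA (k : Int) (dp : List (List Int)) (stair : Int) : List (List Int) :=
  let next0 : List Int := List.replicate (k+1).toNat 0
  let next1 := [(1:Int), 2].foldl (fun next step =>
    if stair - step ≥ 0 then
      (PySem.List.pyRange 0 (k+1) 1).foldl (fun next count =>
        PySem.List.pySetD next count
          (PySem.List.pyGetD next count 0 +
           PySem.List.pyGetD (PySem.List.pyGetD dp (stair - step) []) count 0)) next
    else next) next0
  let next2 := if stair - 3 ≥ 0 then
      (PySem.List.pyRange 1 (k+1) 1).foldl (fun next count =>
        PySem.List.pySetD next count
          (PySem.List.pyGetD next count 0 +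
           PySem.List.pyGetD (PySem.List.pyGetD dp (stair - 3) []) (count - 1) 0)) next1
    else next1
  dp ++ [next2]

lemma solve_eq (n k : Int) :
    solve n k =
      (PySem.List.pyGetD
        ((PySem.List.pyRange 1 (n+1) 1).foldl (stepA k)
          [[(1:Int)] ++ List.replicate k.toNat 0]) (-1) []).sum := rfl

def stepB (t : Int) (prev : List Int) (cur : List Int) (i : Int) : List Int :=
  let v := PySem.List.pyGetD cur (i-1) 0
  let v := if i ≥ 2 then v + PySem.List.pyGetD cur (i-2) 0 else v
  let v := if t ≥ 1 ∧ i ≥ 3 then v + PySem.List.pyGetD prev (i-3) 0 else v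
  cur ++ [v]

def colB (n : Int) (prev : List Int) (t : Int) : List Int :=
  (PySem.List.pyRange 1 (n+1) 1).foldl (stepB t prev) [(1:Int)]

lemma solve_alt_eq (n k : Int) (hn : ¬ n ≤ 0) (hk : ¬ k < 0) :
    solve_alt n k =
      PySem.List.pyGetD ((PySem.List.pyRange 0 (k+1) 1).foldl (colB n) []) n 0 := by
  simp only [solve_alt, if_neg hn, if_neg hk]
  rfl

-- ---- basic facts about E and F ----

lemma E_zero (c : Nat) : E 0 c = if c = 0 then 1 else 0 := by
  rw [E]; simp

lemma E_succ (i c : Nat) (h : i ≠ 0) :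
    E i c = E (i-1) c + (if 2 ≤ i then E (i-2) c else 0) +
            (if 3 ≤ i ∧ 1 ≤ c then E (i-3) (c-1) else 0) := by
  rw [E]; simp [h]

lemma F_zero (t : Nat) : F t 0 = 1 := by
  induction t with
  | zero => simp [F, E_zero]
  | succ t ih => rw [F, Finset.sum_range_succ, ← F, ih, E_zero]; simp

lemma F_rec (t i : Nat) (hi : 1 ≤ i) :
    F t i = F t (i-1) + (if 2 ≤ i then F t (i-2) else 0) +
            (if 1 ≤ t ∧ 3 ≤ i then F (t-1) (i-3) else 0) := by
  have hstep : ∀ c ∈ Finset.range (t+1), E i c =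
      E (i-1) c + (if 2 ≤ i then E (i-2) c else 0) +
      (if 3 ≤ i ∧ 1 ≤ c then E (i-3) (c-1) else 0) := by
    intro c _; exact E_succ i c (by omega)
  rw [F, Finset.sum_congr rfl hstep, Finset.sum_add_distrib, Finset.sum_add_distrib]
  congr 1
  · by_cases h2 : 2 ≤ i <;> simp [h2, F]
  · by_cases h3 : 3 ≤ i
    · simp only [h3, true_and]
      rw [Finset.sum_range_succ']
      simp only [Nat.le_add_left 1, if_pos, Nat.add_sub_cancel]
      cases t with
      | zero => simp
      | succ s => simp [F]
    · simp [h3]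

lemma row0 (K : Nat) : rowE K 0 = (1:Int) :: List.replicate K 0 := by
  rw [rowE, List.range_succ_eq_map, List.map_cons, E_zero]
  simp only [List.map_map]
  congr 1
  have h : ∀ c ∈ List.range K, ((fun c => E 0 c) ∘ Nat.succ) c = (fun _ => (0:Int)) c := by
    intro c _; simp [E_zero]
  rw [List.map_congr_left h]
  simp

lemma list_sum_range (m : Nat) (f : Nat → Int) :
    ((List.range m).map f).sum = ∑ c ∈ Finset.range m, f c := by
  induction m with
  | zero => simp
  | succ m ih => rw [List.range_succ, Finset.sum_range_succ, ← ih]; simp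

lemma rowE_sum (K N : Nat) : (rowE K N).sum = F K N := by
  rw [rowE, list_sum_range]; rfl

-- ---- the two set-index loops of A ----

lemma foldSet (ys : List Int) (m : Nat) : ∀ (xs : List Int), m ≤ xs.length →
    ((PySem.List.pyRange 0 (m:Int) 1).foldl (fun next count =>
        PySem.List.pySetD next count
          (PySem.List.pyGetD next count 0 + PySem.List.pyGetD ys count 0)) xs) =
      xs.mapIdx (fun j x => if j < m then x + ys.getD j 0 else x) := by
  induction m with
  | zero =>
    intro xs _
    rw [PySem.List.pyRange_one_eq_nil (by omega), List.foldl_nil]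
    apply List.ext_getElem <;> simp
  | succ m ih =>
    intro xs h
    have hc : ((m+1 : Nat) : Int) = (m:Int) + 1 := by push_cast; ring
    rw [hc, PySem.List.pyRange_one_succ_right (by exact_mod_cast Nat.zero_le m),
        List.foldl_append, ih xs (by omega), List.foldl_cons, List.foldl_nil]
    rw [PySem.List.pySetD_natCast, PySem.List.pyGetD_natCast, PySem.List.pyGetD_natCast]
    apply List.ext_getElem
    · simp
    · intro j hj1 hj2
      have hm : m < xs.length := by omega
      have hR : (xs.mapIdx (fun j x => if j < m then x + ys.getD j 0 else x)).getD m 0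
          = xs[m] := by
        rw [List.getD_eq_getElem _ _ (by simpa using hm)]
        simp [List.getElem_mapIdx]
      simp only [List.getElem_set, List.getElem_mapIdx]
      by_cases hjm : j = m
      · subst hjm; simp [List.getElem?_eq_getElem hm]
      · rw [if_neg (by omega : ¬ m = j)]
        by_cases hjlt : j < m
        · simp [hjlt, (by omega : j < m + 1)]
        · rw [if_neg hjlt, if_neg (by omega : ¬ j < m + 1)]

lemma foldShift (ys : List Int) (b : Nat) : ∀ (xs : List Int), b ≤ xs.length →
    ((PySem.List.pyRange 1 (b:Int) 1).foldl (fun next count =>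
        PySem.List.pySetD next count
          (PySem.List.pyGetD next count 0 + PySem.List.pyGetD ys (count - 1) 0)) xs) =
      xs.mapIdx (fun j x => if 1 ≤ j ∧ j < b then x + ys.getD (j-1) 0 else x) := by
  induction b with
  | zero =>
    intro xs _
    rw [PySem.List.pyRange_one_eq_nil (by omega), List.foldl_nil]
    apply List.ext_getElem <;> simp
  | succ b ih =>
    intro xs h
    rcases Nat.eq_zero_or_pos b with hb | hb
    · subst hb
      rw [PySem.List.pyRange_one_eq_nil (by omega), List.foldl_nil]
      apply List.ext_getElem
      · simp
      · intro j hj1 hj2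
        simp only [List.getElem_mapIdx]
        rw [if_neg (by omega)]
    · have hc : ((b+1 : Nat) : Int) = (b:Int) + 1 := by push_cast; ring
      have hcb : ((b:Int) - 1) = ((b-1 : Nat) : Int) := by omega
      rw [hc, PySem.List.pyRange_one_succ_right (by exact_mod_cast hb),
          List.foldl_append, ih xs (by omega), List.foldl_cons, List.foldl_nil]
      rw [hcb, PySem.List.pySetD_natCast, PySem.List.pyGetD_natCast, PySem.List.pyGetD_natCast]
      apply List.ext_getElem
      · simp
      · intro j hj1 hj2
        have hm : b < xs.length := by omega
        have hR : (xs.mapIdx (fun j x => if 1 ≤ j ∧ j < b then x + ys.getD (j-1) 0 else x)).getD b 0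
            = xs[b] := by
          rw [List.getD_eq_getElem _ _ (by simpa using hm)]
          simp only [List.getElem_mapIdx]
          rw [if_neg (by omega)]
        simp only [List.getElem_set, List.getElem_mapIdx]
        by_cases hjm : j = b
        · subst hjm
          rw [if_pos rfl, if_pos (by omega), hR]
        · rw [if_neg (by omega : ¬ b = j)]
          by_cases hjlt : 1 ≤ j ∧ j < b
          · rw [if_pos hjlt, if_pos (by omega)]
          · rw [if_neg hjlt, if_neg (by omega)]

-- ---- A's outer loop builds the rows of E ----

lemma getD_map_range_int (f : Nat → Int) (n i : Nat) (h : i < n) :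
    ((List.range n).map f).getD i 0 = f i := by
  rw [List.getD_eq_getElem _ _ (by simpa using h)]
  simp

lemma rowE_getD (K i c : Nat) (h : c < K + 1) : (rowE K i).getD c 0 = E i c := by
  rw [rowE, List.getD_eq_getElem _ _ (by simpa using h)]
  simp

lemma dp_getD (K j i : Nat) (h : i < j) :
    ((List.range j).map (rowE K)).getD i [] = rowE K i := by
  rw [List.getD_eq_getElem _ _ (by simpa using h)]
  simp

lemma stepA_row (K j : Nat) (hj : 1 ≤ j) :
    stepA (K:Int) ((List.range j).map (rowE K)) (j:Int) =
      (List.range (j+1)).map (rowE K) := by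
  have htoNat : ((K:Int)+1).toNat = K + 1 := by omega
  have hK1 : ((K:Int) + 1) = ((K+1 : Nat) : Int) := by push_cast; ring
  have hj1 : (j:Int) - 1 = ((j-1:Nat):Int) := by omega
  have hdp : ∀ (i : Nat), i < j → PySem.List.pyGetD ((List.range j).map (rowE K)) ((i:Nat):Int) [] = rowE K i := by
    intro i hi
    rw [PySem.List.pyGetD_natCast, dp_getD K j i hi]
  rw [List.range_succ, List.map_append, List.map_singleton]
  simp only [stepA, htoNat, List.foldl_cons, List.foldl_nil]
  congr 1
  congr 1
  rw [if_pos (show (j:Int) - 1 ≥ 0 by omega)]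
  by_cases h3 : 3 ≤ j
  · have h2 : 2 ≤ j := by omega
    have hj2 : (j:Int) - 2 = ((j-2:Nat):Int) := by omega
    have hj3 : (j:Int) - 3 = ((j-3:Nat):Int) := by omega
    rw [if_pos (show (j:Int) - 3 ≥ 0 by omega), if_pos (show (j:Int) - 2 ≥ 0 by omega)]
    rw [hj1, hj2, hj3, hdp (j-1) (by omega), hdp (j-2) (by omega), hdp (j-3) (by omega), hK1,
        foldSet (rowE K (j-1)) (K+1) _ (by simp),
        foldSet (rowE K (j-2)) (K+1) _ (by simp),
        foldShift (rowE K (j-3)) (K+1) _ (by simp)]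
    apply List.ext_getElem
    · simp [rowE]
    · intro c hc1 hc2
      have hcK : c < K + 1 := by simpa [rowE] using hc2
      conv_rhs => simp only [rowE]
      simp only [List.getElem_mapIdx, List.getElem_replicate, List.getElem_map,
        List.getElem_range]
      rw [if_pos hcK, if_pos hcK, E_succ j c (by omega), rowE_getD _ _ _ hcK,
          rowE_getD _ _ _ hcK]
      by_cases hc : 1 ≤ c
      · rw [if_pos (show 1 ≤ c ∧ c < K+1 from ⟨hc, hcK⟩), if_pos h2,
            if_pos (show 3 ≤ j ∧ 1 ≤ c from ⟨h3, hc⟩), rowE_getD _ _ _ (by omega)]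
        ring
      · rw [if_neg (show ¬ (1 ≤ c ∧ c < K+1) by omega), if_pos h2,
            if_neg (show ¬ (3 ≤ j ∧ 1 ≤ c) by omega)]
        ring
  · by_cases h2 : 2 ≤ j
    · have hj2 : (j:Int) - 2 = ((j-2:Nat):Int) := by omega
      rw [if_neg (show ¬ (j:Int) - 3 ≥ 0 by omega), if_pos (show (j:Int) - 2 ≥ 0 by omega)]
      rw [hj1, hj2, hdp (j-1) (by omega), hdp (j-2) (by omega), hK1,
          foldSet (rowE K (j-1)) (K+1) _ (by simp),
          foldSet (rowE K (j-2)) (K+1) _ (by simp)]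
      apply List.ext_getElem
      · simp [rowE]
      · intro c hc1 hc2
        have hcK : c < K + 1 := by simpa [rowE] using hc2
        conv_rhs => simp only [rowE]
        simp only [List.getElem_mapIdx, List.getElem_replicate, List.getElem_map,
          List.getElem_range]
        rw [if_pos hcK, if_pos hcK, E_succ j c (by omega), rowE_getD _ _ _ hcK,
            rowE_getD _ _ _ hcK, if_pos h2,
            if_neg (show ¬ (3 ≤ j ∧ 1 ≤ c) by omega)]
        ring
    · rw [if_neg (show ¬ (j:Int) - 3 ≥ 0 by omega), if_neg (show ¬ (j:Int) - 2 ≥ 0 by omega)]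
      rw [hj1, hdp (j-1) (by omega), hK1, foldSet (rowE K (j-1)) (K+1) _ (by simp)]
      apply List.ext_getElem
      · simp [rowE]
      · intro c hc1 hc2
        have hcK : c < K + 1 := by simpa [rowE] using hc2
        conv_rhs => simp only [rowE]
        simp only [List.getElem_mapIdx, List.getElem_replicate, List.getElem_map,
          List.getElem_range]
        rw [if_pos hcK, E_succ j c (by omega), rowE_getD _ _ _ hcK, if_neg h2,
            if_neg (show ¬ (3 ≤ j ∧ 1 ≤ c) by omega)]
        ring

lemma outerA (K : Nat) (j : Nat) :
    (PySem.List.pyRange 1 ((j:Int)+1) 1).foldl (stepA (K:Int)) [rowE K 0] =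
      (List.range (j+1)).map (rowE K) := by
  induction j with
  | zero =>
    rw [show ((0:Nat):Int) + 1 = 1 by norm_num, PySem.List.pyRange_one_eq_nil (by omega),
        List.foldl_nil]
    simp [List.range_succ]
  | succ j ih =>
    have hc : ((j+1 : Nat) : Int) + 1 = ((j:Int) + 1) + 1 := by push_cast; ring
    rw [hc, PySem.List.pyRange_one_succ_right (by omega), List.foldl_append, ih,
        List.foldl_cons, List.foldl_nil,
        show ((j:Int) + 1) = ((j+1 : Nat) : Int) by push_cast; ring,
        stepA_row K (j+1) (by omega)]

-- ---- B's loops build the columns of F ----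

lemma stepB_col (N : Nat) (t : Nat) (prev : List Int)
    (hprev : 1 ≤ t → prev = (List.range (N+1)).map (F (t-1))) (m : Nat) (hm : m ≤ N) :
    (PySem.List.pyRange 1 ((m:Int)+1) 1).foldl (stepB (t:Int) prev) [(1:Int)] =
      (List.range (m+1)).map (fun i => F t i) := by
  induction m with
  | zero =>
    rw [show ((0:Nat):Int) + 1 = 1 by norm_num, PySem.List.pyRange_one_eq_nil (by omega),
        List.foldl_nil]
    simp [List.range_succ, F_zero]
  | succ m ihm =>
    have hc : ((m+1 : Nat) : Int) + 1 = ((m:Int) + 1) + 1 := by push_cast; ring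
    rw [hc, PySem.List.pyRange_one_succ_right (by omega), List.foldl_append,
        ihm (by omega), List.foldl_cons, List.foldl_nil]
    conv_rhs => rw [List.range_succ, List.map_append, List.map_singleton]
    simp only [stepB]
    rw [show ((m:Int)+1) - 1 = ((m:Nat):Int) by ring, PySem.List.pyGetD_natCast,
        getD_map_range_int _ _ _ (by omega)]
    congr 2
    rw [F_rec t (m+1) (by omega), Nat.add_sub_cancel,
        show m+1-2 = m-1 from by omega, show m+1-3 = m-2 from by omega]
    by_cases hm1 : 1 ≤ m
    · rw [if_pos (show (m:Int)+1 ≥ 2 by omega),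
          show ((m:Int)+1) - 2 = ((m-1:Nat):Int) by omega, PySem.List.pyGetD_natCast,
          getD_map_range_int _ _ _ (by omega), if_pos (show 2 ≤ m + 1 by omega)]
      by_cases ht : 1 ≤ t ∧ 2 ≤ m
      · rw [if_pos (show (t:Int) ≥ 1 ∧ (m:Int)+1 ≥ 3 by omega), hprev ht.1,
            show ((m:Int)+1) - 3 = ((m-2:Nat):Int) by omega, PySem.List.pyGetD_natCast,
            getD_map_range_int _ _ _ (by omega),
            if_pos (show 1 ≤ t ∧ 3 ≤ m + 1 by omega)]
      · rw [if_neg (show ¬ ((t:Int) ≥ 1 ∧ (m:Int)+1 ≥ 3) by omega),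
            if_neg (show ¬ (1 ≤ t ∧ 3 ≤ m + 1) by omega)]
        ring
    · rw [if_neg (show ¬ (m:Int)+1 ≥ 2 by omega),
          if_neg (show ¬ ((t:Int) ≥ 1 ∧ (m:Int)+1 ≥ 3) by omega),
          if_neg (show ¬ 2 ≤ m + 1 by omega),
          if_neg (show ¬ (1 ≤ t ∧ 3 ≤ m + 1) by omega)]
      ring

lemma colB_eq (N : Nat) (t : Nat) (prev : List Int)
    (hprev : 1 ≤ t → prev = (List.range (N+1)).map (F (t-1))) :
    colB (N:Int) prev (t:Int) = (List.range (N+1)).map (fun i => F t i) := by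
  rw [colB]
  exact stepB_col N t prev hprev N le_rfl

lemma outerB (N : Nat) (t : Nat) :
    (PySem.List.pyRange 0 ((t:Int)+1) 1).foldl (colB (N:Int)) [] =
      (List.range (N+1)).map (fun i => F t i) := by
  induction t with
  | zero =>
    rw [show ((0:Nat):Int) + 1 = 0 + 1 by norm_num, PySem.List.pyRange_one_singleton,
        List.foldl_cons, List.foldl_nil, show (0:Int) = ((0:Nat):Int) by norm_num,
        colB_eq N 0 [] (by omega)]
  | succ t ih =>
    have hc : ((t+1 : Nat) : Int) + 1 = ((t:Int) + 1) + 1 := by push_cast; ring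
    rw [hc, PySem.List.pyRange_one_succ_right (by omega), List.foldl_append, ih,
        List.foldl_cons, List.foldl_nil,
        show ((t:Int) + 1) = ((t+1 : Nat) : Int) by push_cast; ring,
        colB_eq N (t+1) _ (fun _ => by rw [Nat.add_sub_cancel])]

-- ---- degenerate cases ----

lemma solve_nonpos (n k : Int) (hn : n ≤ 0) : solve n k = 1 := by
  rw [solve_eq, PySem.List.pyRange_one_eq_nil (by omega), List.foldl_nil,
      PySem.List.pyGetD_neg_one _ _ (by simp)]
  simp [List.sum_replicate]

lemma solve_negk (n k : Int) (hn : 0 < n) (hk : k < 0) : solve n k = 0 := by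
  rw [solve_eq]
  have hstep : ∀ (dp : List (List Int)) (stair : Int), stair ∈ PySem.List.pyRange 1 (n+1) 1 →
      stepA k dp stair = dp ++ [[]] := by
    intro dp stair _
    simp only [stepA]
    rw [show (k+1).toNat = 0 by omega, PySem.List.pyRange_one_eq_nil (show k+1 ≤ 0 by omega),
        PySem.List.pyRange_one_eq_nil (show k+1 ≤ 1 by omega)]
    simp
  rw [PySem.List.foldl_congr_mem' _ _ (fun acc (_ : Int) => acc ++ [([] : List Int)]) _
        (fun x hx acc => hstep acc x hx),
      PySem.List.foldl_append_singleton_eq_map]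
  have hl : PySem.List.pyRange 1 (n+1) 1 ≠ [] := by
    intro h
    have := congrArg List.length h
    rw [PySem.List.length_pyRange_one] at this
    simp at this
    omega
  rw [← List.dropLast_append_getLast hl, List.map_append, List.map_singleton,
      ← List.append_assoc, PySem.List.pyGetD_neg_one_append_singleton]
  simp

lemma solve_main (n k : Int) (hn : 0 < n) (hk : 0 ≤ k) :
    solve n k = F k.toNat n.toNat := by
  have hN : n = ((n.toNat : Nat) : Int) := by omega
  have hK : k = ((k.toNat : Nat) : Int) := by omega
  rw [solve_eq, hN, hK, show ([(1:Int)] ++ List.replicate (((k.toNat : Nat) : Int)).toNat 0)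
        = rowE k.toNat 0 by rw [row0]; simp; omega,
      outerA k.toNat n.toNat, List.range_succ, List.map_append, List.map_singleton,
      PySem.List.pyGetD_neg_one_append_singleton, rowE_sum]
  congr 1

lemma solve_alt_main (n k : Int) (hn : 0 < n) (hk : 0 ≤ k) :
    solve_alt n k = F k.toNat n.toNat := by
  have hN : n = ((n.toNat : Nat) : Int) := by omega
  have hK : k = ((k.toNat : Nat) : Int) := by omega
  rw [solve_alt_eq n k (by omega) (by omega), hN, hK, outerB n.toNat k.toNat,
      PySem.List.pyGetD_natCast, getD_map_range_int _ _ _ (by omega)]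
  congr 1

-- ===== VERDICT (by name: the statement is the Claim_ definition above) =====
theorem solve_spec : Claim_equal_solve := by
  intro n k _
  unfold Spec_solve
  by_cases hn : n ≤ 0
  · rw [solve_nonpos n k hn, solve_alt, if_pos hn]
  · by_cases hk : k < 0
    · rw [solve_negk n k (by omega) hk, solve_alt, if_neg hn, if_pos hk]
    · rw [solve_main n k (by omega) (by omega), solve_alt_main n k (by omega) (by omega)]
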